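-- pv_equiv track=rewrite | github.com/whitem4rk/2023-algorithm-study | LEVEL 1/mbti2.py | solution
-- ===== SOURCE A (Python) =====
-- def solution(survey, choices):
--     score_dict = {'RT':0, 'CF':0, 'JM':0, 'AN':0}
--
--     for s, c in zip(survey, choices):
--         c -= 4
--         if s in score_dict:
--             score_dict[s] += c
--         else:
--             score_dict[s[::-1]] -= c
--
--     result = ''
--     for obj, score in score_dict.items():
--         if score > 0:
--             result += obj[1]
--         else:
--             result += obj[0]
--
--     return result
-- ===== SOURCE B (Python) =====
-- def solution(survey, choices):
--     answers = list(zip(survey, choices))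
--     result = ''
--     for p in ('RT', 'CF', 'JM', 'AN'):
--         diff = sum((c - 4) if s == p else (4 - c)
--                    for s, c in answers if s in (p, p[::-1]))
--         result += p[1] if diff > 0 else p[0]
--     return result
-- ===== Notes on version B (the rewrite author's own statement) =====
-- stated objective: alternative
-- what changed: B has no dict and no per-answer state at all: for each of the four fixed trait pairs it makes its own pass over the answers, summing the signed deviation of the matching answers in closed form, and appends the winning letter; A instead threads one mutable pair-keyed dict through a single pass (with a membership-test/reverse-and-subtract update) and then walks the dict items.
import Mathlib
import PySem

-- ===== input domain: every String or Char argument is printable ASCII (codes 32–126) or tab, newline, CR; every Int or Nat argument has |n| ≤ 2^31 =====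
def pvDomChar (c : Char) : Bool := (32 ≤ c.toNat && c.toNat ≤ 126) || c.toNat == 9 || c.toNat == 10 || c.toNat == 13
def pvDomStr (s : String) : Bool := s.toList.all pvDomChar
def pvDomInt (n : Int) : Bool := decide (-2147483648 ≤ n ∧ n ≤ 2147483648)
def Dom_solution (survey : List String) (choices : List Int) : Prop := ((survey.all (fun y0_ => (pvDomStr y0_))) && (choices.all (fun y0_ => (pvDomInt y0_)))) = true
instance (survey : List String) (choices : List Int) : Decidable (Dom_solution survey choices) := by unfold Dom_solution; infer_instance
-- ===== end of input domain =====

-- B drops A's mutable pair-keyed dict: it makes a separate pass per trait pair, summing the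
-- signed deviations of the matching answers, then appends the winning letter (alternative
-- decomposition, same asymptotic cost).


-- ===== PORT A =====
-- The Python dict keys are strs; following the PySem convention they are ported as their
-- char lists; the result string is built as its char list and packed with String.ofList.
def pvStepA (d : PySem.Dict (List Char) Int) (p : String × Int) : PySem.Dict (List Char) Int :=
  let s := p.1.toList
  let c := p.2 - 4
  if d.contains s then
    d.insert s (d.getD s 0 + c)                      -- score_dict[s] += c
  else
    -- score_dict[s[::-1]] -= c : getD 0 is exact where the reversed key exists (all of
    -- Pre_solution); where it does not, Python raises KeyError (excluded by Pre_solution)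
    d.insert s.reverse (d.getD s.reverse 0 - c)

def pvFinishA (d : PySem.Dict (List Char) Int) : List Char :=
  d.items.foldl (fun r p =>
    r ++ (if p.2 > 0 then (PySem.List.pyGet? p.1 1).toList else (PySem.List.pyGet? p.1 0).toList)) []
  -- obj[1] / obj[0]: pyGet? is exact; none (Python IndexError, key shorter than 2) never
  -- occurs on Pre_solution inputs, where every key is one of the four two-char keys

def solution (survey : List String) (choices : List Int) : String :=
  let d := (survey.zip choices).foldl pvStepA
    (PySem.Dict.ofList [(['R','T'],0),(['C','F'],0),(['J','M'],0),(['A','N'],0)])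
  String.ofList (pvFinishA d)

-- ===== PORT B =====
-- diff = sum((c-4) if s == p else (4-c) for s, c in answers if s in (p, p[::-1])):
-- the generator's filter and sum, transcribed as a filter and a foldl-sum over the answers
def pvPairSum (a b : Char) (answers : List (String × Int)) : Int :=
  (answers.filter (fun q => q.1.toList == [a, b] || q.1.toList == [b, a])).foldl
    (fun acc q => acc + (if q.1.toList = [a, b] then q.2 - 4 else 4 - q.2)) 0

def solution_alt (survey : List String) (choices : List Int) : String :=
  let answers := survey.zip choices
  String.ofList ([('R','T'), ('C','F'), ('J','M'), ('A','N')].foldl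
    (fun r p => r ++ [if pvPairSum p.1 p.2 answers > 0 then p.2 else p.1]) [])

-- ===== PRECONDITION & SPEC =====
-- Pre_: every surveyed pair type (up to the zip length) is one of the eight MBTI pair
-- spellings; exactly there A returns normally (otherwise A raises KeyError on the unknown key)
def pvKeys8 : List (List Char) :=
  [['R','T'],['C','F'],['J','M'],['A','N'],['T','R'],['F','C'],['M','J'],['N','A']]

def Pre_solution (survey : List String) (choices : List Int) : Prop :=
  ∀ p ∈ survey.zip choices, p.1.toList ∈ pvKeys8
instance (survey : List String) (choices : List Int) : Decidable (Pre_solution survey choices) := by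
  unfold Pre_solution; infer_instance

def pvWitness_solution : List String × List Int := (["RT", "NA", "CF"], [1, 6, 4])

def Spec_solution (survey : List String) (choices : List Int) (out : String) : Prop := out = solution_alt survey choices
instance (survey : List String) (choices : List Int) (out : String) : Decidable (Spec_solution survey choices out) := by unfold Spec_solution; infer_instance

-- ===== CLAIM (what is proved, stated in full; the proofs are below) =====
def Claim_equal_solution : Prop := ∀ (survey : List String) (choices : List Int), Dom_solution survey choices → Pre_solution survey choices → Spec_solution survey choices (solution survey choices)

-- ===== LEMMAS AND PROOFS =====

-- A's dict state: always the four pair keys in their original order (symbolic scores)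
def pvDictA (va vb vj vn : Int) : PySem.Dict (List Char) Int :=
  PySem.Dict.mk [(['R','T'],va), (['C','F'],vb), (['J','M'],vj), (['A','N'],vn)]

lemma pvInitA : PySem.Dict.ofList [(['R','T'],(0:Int)),(['C','F'],0),(['J','M'],0),(['A','N'],0)] = pvDictA 0 0 0 0 := rfl

lemma pvDictA_congr {x1 x2 x3 x4 y1 y2 y3 y4 : Int}
    (h1 : x1 = y1) (h2 : x2 = y2) (h3 : x3 = y3) (h4 : x4 = y4) :
    pvDictA x1 x2 x3 x4 = pvDictA y1 y2 y3 y4 := by rw [h1, h2, h3, h4]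

-- one A-step on the invariant state, per survey word
lemma pvA_RT (s : String) (hs : s.toList = ['R','T']) (va vb vj vn c : Int) : pvStepA (pvDictA va vb vj vn) (s, c) = pvDictA (va + (c - 4)) vb vj vn := by
  simp [pvStepA, hs, pvDictA, PySem.Dict.insert, PySem.Dict.getD_eq_get?_getD, PySem.Dict.get?_mk_cons]
lemma pvA_TR (s : String) (hs : s.toList = ['T','R']) (va vb vj vn c : Int) : pvStepA (pvDictA va vb vj vn) (s, c) = pvDictA (va - (c - 4)) vb vj vn := by
  simp [pvStepA, hs, pvDictA, PySem.Dict.insert, PySem.Dict.getD_eq_get?_getD, PySem.Dict.get?_mk_cons]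
lemma pvA_CF (s : String) (hs : s.toList = ['C','F']) (va vb vj vn c : Int) : pvStepA (pvDictA va vb vj vn) (s, c) = pvDictA va (vb + (c - 4)) vj vn := by
  simp [pvStepA, hs, pvDictA, PySem.Dict.insert, PySem.Dict.getD_eq_get?_getD, PySem.Dict.get?_mk_cons]
lemma pvA_FC (s : String) (hs : s.toList = ['F','C']) (va vb vj vn c : Int) : pvStepA (pvDictA va vb vj vn) (s, c) = pvDictA va (vb - (c - 4)) vj vn := by
  simp [pvStepA, hs, pvDictA, PySem.Dict.insert, PySem.Dict.getD_eq_get?_getD, PySem.Dict.get?_mk_cons]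
lemma pvA_JM (s : String) (hs : s.toList = ['J','M']) (va vb vj vn c : Int) : pvStepA (pvDictA va vb vj vn) (s, c) = pvDictA va vb (vj + (c - 4)) vn := by
  simp [pvStepA, hs, pvDictA, PySem.Dict.insert, PySem.Dict.getD_eq_get?_getD, PySem.Dict.get?_mk_cons]
lemma pvA_MJ (s : String) (hs : s.toList = ['M','J']) (va vb vj vn c : Int) : pvStepA (pvDictA va vb vj vn) (s, c) = pvDictA va vb (vj - (c - 4)) vn := by
  simp [pvStepA, hs, pvDictA, PySem.Dict.insert, PySem.Dict.getD_eq_get?_getD, PySem.Dict.get?_mk_cons]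
lemma pvA_AN (s : String) (hs : s.toList = ['A','N']) (va vb vj vn c : Int) : pvStepA (pvDictA va vb vj vn) (s, c) = pvDictA va vb vj (vn + (c - 4)) := by
  simp [pvStepA, hs, pvDictA, PySem.Dict.insert, PySem.Dict.getD_eq_get?_getD, PySem.Dict.get?_mk_cons]
lemma pvA_NA (s : String) (hs : s.toList = ['N','A']) (va vb vj vn c : Int) : pvStepA (pvDictA va vb vj vn) (s, c) = pvDictA va vb vj (vn - (c - 4)) := by
  simp [pvStepA, hs, pvDictA, PySem.Dict.insert, PySem.Dict.getD_eq_get?_getD, PySem.Dict.get?_mk_cons]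

-- B's pair sum on a cons cell, split by whether/how the head matches the pair
lemma pvSum_cons_fst (a b : Char) (s : String) (c : Int) (L : List (String × Int))
    (hs : s.toList = [a, b]) :
    pvPairSum a b ((s, c) :: L) = (c - 4) + pvPairSum a b L := by
  simp only [pvPairSum, List.filter_cons, hs]
  simp [PySem.List.foldl_add, hs]
lemma pvSum_cons_snd (a b : Char) (s : String) (c : Int) (L : List (String × Int))
    (hs : s.toList = [b, a]) (hne : s.toList ≠ [a, b]) :
    pvPairSum a b ((s, c) :: L) = (4 - c) + pvPairSum a b L := by
  simp only [pvPairSum, List.filter_cons, hs]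
  have : ([b, a] : List Char) ≠ [a, b] := by rw [← hs]; exact hne
  simp [PySem.List.foldl_add, hs, this]
lemma pvSum_cons_none (a b : Char) (s : String) (c : Int) (L : List (String × Int))
    (h1 : s.toList ≠ [a, b]) (h2 : s.toList ≠ [b, a]) :
    pvPairSum a b ((s, c) :: L) = pvPairSum a b L := by
  simp only [pvPairSum, List.filter_cons]
  simp [h1, h2]

-- the loop invariant: A's dict carries exactly B's four pair sums (shifted by the start values)
lemma pvMain : ∀ (L : List (String × Int)), (∀ p ∈ L, p.1.toList ∈ pvKeys8) →
    ∀ (va vb vj vn : Int),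
    L.foldl pvStepA (pvDictA va vb vj vn) =
      pvDictA (va + pvPairSum 'R' 'T' L) (vb + pvPairSum 'C' 'F' L)
              (vj + pvPairSum 'J' 'M' L) (vn + pvPairSum 'A' 'N' L) := by
  intro L
  induction L with
  | nil => intro _ va vb vj vn; simp [pvPairSum]
  | cons p L ih =>
    intro hmem va vb vj vn
    obtain ⟨s, c⟩ := p
    have hs := hmem (s, c) (List.mem_cons_self ..)
    have hrest : ∀ q ∈ L, q.1.toList ∈ pvKeys8 := fun q hq => hmem q (List.mem_cons_of_mem _ hq)
    simp only [pvKeys8, List.mem_cons, List.not_mem_nil, or_false] at hs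
    simp only [List.foldl_cons]
    rcases hs with h|h|h|h|h|h|h|h
    · rw [pvA_RT _ h, ih hrest,
        pvSum_cons_fst _ _ _ _ _ h, pvSum_cons_none _ _ _ _ _ (by simp [h]) (by simp [h]),
        pvSum_cons_none _ _ _ _ _ (by simp [h]) (by simp [h]),
        pvSum_cons_none _ _ _ _ _ (by simp [h]) (by simp [h])]
      exact pvDictA_congr (by ring) rfl rfl rfl
    · rw [pvA_CF _ h, ih hrest,
        pvSum_cons_none _ _ _ _ _ (by simp [h]) (by simp [h]), pvSum_cons_fst _ _ _ _ _ h,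
        pvSum_cons_none _ _ _ _ _ (by simp [h]) (by simp [h]),
        pvSum_cons_none _ _ _ _ _ (by simp [h]) (by simp [h])]
      exact pvDictA_congr rfl (by ring) rfl rfl
    · rw [pvA_JM _ h, ih hrest,
        pvSum_cons_none _ _ _ _ _ (by simp [h]) (by simp [h]),
        pvSum_cons_none _ _ _ _ _ (by simp [h]) (by simp [h]), pvSum_cons_fst _ _ _ _ _ h,
        pvSum_cons_none _ _ _ _ _ (by simp [h]) (by simp [h])]
      exact pvDictA_congr rfl rfl (by ring) rfl
    · rw [pvA_AN _ h, ih hrest,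
        pvSum_cons_none _ _ _ _ _ (by simp [h]) (by simp [h]),
        pvSum_cons_none _ _ _ _ _ (by simp [h]) (by simp [h]),
        pvSum_cons_none _ _ _ _ _ (by simp [h]) (by simp [h]), pvSum_cons_fst _ _ _ _ _ h]
      exact pvDictA_congr rfl rfl rfl (by ring)
    · rw [pvA_TR _ h, ih hrest,
        pvSum_cons_snd _ _ _ _ _ h (by simp [h]), pvSum_cons_none _ _ _ _ _ (by simp [h]) (by simp [h]),
        pvSum_cons_none _ _ _ _ _ (by simp [h]) (by simp [h]),
        pvSum_cons_none _ _ _ _ _ (by simp [h]) (by simp [h])]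
      exact pvDictA_congr (by ring) rfl rfl rfl
    · rw [pvA_FC _ h, ih hrest,
        pvSum_cons_none _ _ _ _ _ (by simp [h]) (by simp [h]), pvSum_cons_snd _ _ _ _ _ h (by simp [h]),
        pvSum_cons_none _ _ _ _ _ (by simp [h]) (by simp [h]),
        pvSum_cons_none _ _ _ _ _ (by simp [h]) (by simp [h])]
      exact pvDictA_congr rfl (by ring) rfl rfl
    · rw [pvA_MJ _ h, ih hrest,
        pvSum_cons_none _ _ _ _ _ (by simp [h]) (by simp [h]),
        pvSum_cons_none _ _ _ _ _ (by simp [h]) (by simp [h]), pvSum_cons_snd _ _ _ _ _ h (by simp [h]),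
        pvSum_cons_none _ _ _ _ _ (by simp [h]) (by simp [h])]
      exact pvDictA_congr rfl rfl (by ring) rfl
    · rw [pvA_NA _ h, ih hrest,
        pvSum_cons_none _ _ _ _ _ (by simp [h]) (by simp [h]),
        pvSum_cons_none _ _ _ _ _ (by simp [h]) (by simp [h]),
        pvSum_cons_none _ _ _ _ _ (by simp [h]) (by simp [h]), pvSum_cons_snd _ _ _ _ _ h (by simp [h])]
      exact pvDictA_congr rfl rfl rfl (by ring)

-- A's item walk over the invariant state is B's four comparisons
lemma pvFinal (va vb vj vn : Int) :
    pvFinishA (pvDictA va vb vj vn) =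
      [if va > 0 then 'T' else 'R', if vb > 0 then 'F' else 'C',
       if vj > 0 then 'M' else 'J', if vn > 0 then 'N' else 'A'] := by
  simp [pvFinishA, pvDictA, PySem.List.pyGet?, PySem.List.pyIdx?, List.foldl]
  split_ifs <;> rfl

-- ===== VERDICT (by name: the statement is the Claim_ definition above) =====
theorem solution_spec : Claim_equal_solution := by
  intro survey choices _ hpre
  unfold Spec_solution solution solution_alt
  simp only [pvInitA]
  rw [pvMain (survey.zip choices) hpre 0 0 0 0, pvFinal]
  simp [List.foldl]
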